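-- pv_equiv track=rewrite | github.com/AyushAgnihotri2025/CP-Solutions | GeeksforGeeks/Python3/Easy/Minimum Integer/minimum-integer.py | minimumInteger
-- ===== SOURCE A (Python) =====
-- from typing import List
--
-- def minimumInteger(N : int, A : List[int]) -> int:
--     # code here
--     if N>1:
--         arr_sum, final = sum(A), {}
--         for i in range(N):
--             temp = N*A[i]
--             if temp >= arr_sum:
--                final[temp] = A[i]
--         return min(zip(final.keys(), final.values()))[1]
--     else:
--         return A[0]
-- ===== SOURCE B (Python) =====
-- def minimumInteger(N, A):
--     if N <= 1:
--         return A[0]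
--     s = sum(A)
--     for x in sorted(A[i] for i in range(N)):
--         if N * x >= s:
--             return x
-- ===== Notes on version B (the rewrite author's own statement) =====
-- stated objective: alternative
-- what changed: Replaces A's dict of N*A[i] keys plus min over zipped (key,value) pairs by sorting the first N elements and returning the first element x of the sorted order with N*x >= sum(A).
import Mathlib
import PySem

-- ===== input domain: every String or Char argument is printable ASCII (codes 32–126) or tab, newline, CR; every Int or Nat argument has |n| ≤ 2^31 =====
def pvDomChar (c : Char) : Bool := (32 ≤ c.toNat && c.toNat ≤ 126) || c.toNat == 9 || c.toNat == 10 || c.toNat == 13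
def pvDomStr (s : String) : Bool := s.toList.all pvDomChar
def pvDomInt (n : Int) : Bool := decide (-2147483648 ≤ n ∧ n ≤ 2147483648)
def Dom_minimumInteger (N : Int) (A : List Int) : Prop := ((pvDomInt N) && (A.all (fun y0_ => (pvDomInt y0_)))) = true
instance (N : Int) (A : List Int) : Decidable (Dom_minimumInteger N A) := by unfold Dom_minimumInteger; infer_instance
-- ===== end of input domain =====

-- B replaces A's dict of N*A[i] keys + min over zipped pairs by sort-then-scan (first sorted x with N*x >= sum); return values only, no mutation.

-- ===== PORT A =====
def minimumInteger (N : Int) (A : List Int) : Int :=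
  if N > 1 then
    let arrSum := A.sum
    let final : PySem.Dict Int Int :=
      (PySem.List.pyRange 0 N).foldl
        (fun d i =>
          let temp := N * PySem.List.pyGetD A i 0
          if temp ≥ arrSum then d.insert temp (PySem.List.pyGetD A i 0) else d)
        PySem.Dict.empty
    ((PySem.List.min2? (final.keys.zip final.values) Prod.fst Prod.snd).getD (0, 0)).2
  else
    PySem.List.pyGetD A 0 0

-- ===== PORT B =====
-- the for-loop with early return over the sorted list
def pvFirstGe (N s : Int) : List Int → Int
  | [] => 0
  | x :: t => if N * x ≥ s then x else pvFirstGe N s t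

def minimumInteger_alt (N : Int) (A : List Int) : Int :=
  if N ≤ 1 then PySem.List.pyGetD A 0 0
  else
    let s := A.sum
    let xs := PySem.List.sorted ((PySem.List.pyRange 0 N).map (fun i => PySem.List.pyGetD A i 0)) (fun x => x)
    pvFirstGe N s xs

-- ===== PRECONDITION & SPEC =====
-- Pre_ excludes exactly the inputs where A raises: A = [] with N ≤ 1 (IndexError),
-- N > len(A) with N > 1 (IndexError), and N > 1 with no x among the first N elements
-- satisfying N*x >= sum(A) (min() of an empty sequence, ValueError).
def Pre_minimumInteger (N : Int) (A : List Int) : Prop :=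
  if 1 < N then N ≤ (A.length : Int) ∧ ∃ x ∈ A.take N.toNat, N * x ≥ A.sum
  else A ≠ []
instance (N : Int) (A : List Int) : Decidable (Pre_minimumInteger N A) := by unfold Pre_minimumInteger; infer_instance
def pvWitness_minimumInteger : Int × List Int := (2, [1, 3])

def Spec_minimumInteger (N : Int) (A : List Int) (out : Int) : Prop := out = minimumInteger_alt N A
instance (N : Int) (A : List Int) (out : Int) : Decidable (Spec_minimumInteger N A out) := by unfold Spec_minimumInteger; infer_instance

-- ===== CLAIM (what is proved, stated in full; the proofs are below) =====
def Claim_equal_minimumInteger : Prop := ∀ (N : Int) (A : List Int), Dom_minimumInteger N A → Pre_minimumInteger N A → Spec_minimumInteger N A (minimumInteger N A)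

-- ===== LEMMAS AND PROOFS =====

-- the first N elements, as both ports index them
theorem pvPrefix_eq (N : Int) (A : List Int) (h0 : 0 < N) (hlen : N ≤ (A.length : Int)) :
    (PySem.List.pyRange 0 N).map (fun i => PySem.List.pyGetD A i 0) = A.take N.toNat := by
  have hN : N = (N.toNat : Int) := (Int.toNat_of_nonneg (le_of_lt h0)).symm
  rw [hN, PySem.List.pyRange_zero_natCast, List.map_map]
  apply List.ext_getElem
  · simp; omega
  · intro i h1 h2
    simp only [List.getElem_map, List.getElem_range, Function.comp_apply,
      PySem.List.pyGetD_natCast, List.getD_eq_getElem?_getD, List.getElem_take]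
    have : i < A.length := by simp at h1; omega
    simp [List.getElem?_eq_getElem this]

-- characterisation of the items of A's dict after the loop
theorem pvDict_char (N s : Int) (hN : 0 < N) :
    ∀ (L : List Int) (d : PySem.Dict Int Int),
    (∀ p ∈ d.items, p.1 = N * p.2) →
    ∀ p : Int × Int,
      (p ∈ (L.foldl (fun d x => if N * x ≥ s then d.insert (N * x) x else d) d).items ↔
        (p ∈ d.items ∨ (p.1 = N * p.2 ∧ p.2 ∈ L ∧ N * p.2 ≥ s))) := by
  intro L
  induction L with
  | nil => intro d _ p; simp
  | cons x t ih =>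
    intro d hform p
    simp only [List.foldl_cons]
    by_cases hq : N * x ≥ s
    · rw [if_pos hq]
      have hform' : ∀ q ∈ (d.insert (N * x) x).items, q.1 = N * q.2 := by
        intro q hq'
        rcases (PySem.Dict.mem_items_insert d (N * x) x q).1 hq' with h | ⟨h, _⟩
        · rw [h]
        · exact hform q h
      rw [ih (d.insert (N * x) x) hform' p, PySem.Dict.mem_items_insert]
      constructor
      · rintro ((h | ⟨h, hne⟩) | ⟨h1, h2, h3⟩)
        · exact Or.inr ⟨by rw [h], by rw [h]; exact ⟨List.mem_cons_self, hq⟩⟩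
        · exact Or.inl h
        · exact Or.inr ⟨h1, List.mem_cons_of_mem _ h2, h3⟩
      · rintro (h | ⟨h1, h2, h3⟩)
        · by_cases hk : p.1 = N * x
          · left
            have hx : p.2 = x := by
              have := hform p h
              have : N * p.2 = N * x := by omega
              exact mul_left_cancel₀ (by omega) this
            have : p = (N * x, x) := by
              apply Prod.ext <;> simp [hk, hx]
            exact Or.inl this
          · exact Or.inl (Or.inr ⟨h, hk⟩)
        · rcases List.mem_cons.1 h2 with h2 | h2
          · left; left
            apply Prod.ext <;> simp [h1, h2]
          · exact Or.inr ⟨h1, h2, h3⟩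
    · rw [if_neg hq]
      rw [ih d hform p]
      constructor
      · rintro (h | ⟨h1, h2, h3⟩)
        · exact Or.inl h
        · exact Or.inr ⟨h1, List.mem_cons_of_mem _ h2, h3⟩
      · rintro (h | ⟨h1, h2, h3⟩)
        · exact Or.inl h
        · rcases List.mem_cons.1 h2 with h2 | h2
          · exfalso; rw [h2] at h3; exact hq h3
          · exact Or.inr ⟨h1, h2, h3⟩

-- on pairs whose first component is N times the second, Python's lexicographic
-- tuple-min (min2?) is the min keyed by the second component
theorem pvMin2_app_none (ps : List (Int × Int)) (x : Int × Int)
    (h : PySem.List.min2? ps Prod.fst Prod.snd = none) :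
    PySem.List.min2? (ps ++ [x]) Prod.fst Prod.snd = some x := by
  unfold PySem.List.min2? at h ⊢
  simp only [List.foldl_append, h, List.foldl_cons, List.foldl_nil]

theorem pvMin2_app_some (ps : List (Int × Int)) (x m : Int × Int)
    (h : PySem.List.min2? ps Prod.fst Prod.snd = some m) :
    PySem.List.min2? (ps ++ [x]) Prod.fst Prod.snd =
      if (decide (x.1 < m.1) || !decide (m.1 < x.1) && decide (x.2 < m.2)) = true then some x else some m := by
  unfold PySem.List.min2? at h ⊢
  simp only [List.foldl_append, h, List.foldl_cons, List.foldl_nil]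

theorem pvMin1_app_none (ps : List (Int × Int)) (x : Int × Int)
    (h : PySem.List.min? ps Prod.snd = none) :
    PySem.List.min? (ps ++ [x]) Prod.snd = some x := by
  unfold PySem.List.min? at h ⊢
  simp only [List.foldl_append, h, List.foldl_cons, List.foldl_nil]

theorem pvMin1_app_some (ps : List (Int × Int)) (x m : Int × Int)
    (h : PySem.List.min? ps Prod.snd = some m) :
    PySem.List.min? (ps ++ [x]) Prod.snd = if x.2 < m.2 then some x else some m := by
  unfold PySem.List.min? at h ⊢
  simp only [List.foldl_append, h, List.foldl_cons, List.foldl_nil]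

theorem pvMin2_eq_min_snd (N : Int) (hN : 0 < N) (ps : List (Int × Int))
    (hform : ∀ p ∈ ps, p.1 = N * p.2) :
    PySem.List.min2? ps Prod.fst Prod.snd = PySem.List.min? ps Prod.snd := by
  induction ps using List.reverseRecOn with
  | nil => rfl
  | append_singleton ps x ih =>
    have hform' : ∀ p ∈ ps, p.1 = N * p.2 := fun p hp => hform p (by simp [hp])
    have hx := hform x (by simp)
    cases h : PySem.List.min? ps Prod.snd with
    | none => rw [pvMin2_app_none ps x ((ih hform').trans h), pvMin1_app_none ps x h]
    | some m =>
      have hmf := hform' m (PySem.List.min?_mem h)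
      rw [pvMin2_app_some ps x m ((ih hform').trans h), pvMin1_app_some ps x m h]
      have hiff : N * x.2 < N * m.2 ↔ x.2 < m.2 :=
        ⟨fun h' => lt_of_mul_lt_mul_left h' (by omega), fun h' => mul_lt_mul_of_pos_left h' hN⟩
      rw [hx, hmf]
      by_cases hlt : x.2 < m.2
      · have h1 : N * x.2 < N * m.2 := hiff.2 hlt
        simp [h1, hlt]
      · have h1 : ¬ N * x.2 < N * m.2 := fun hc => hlt (hiff.1 hc)
        simp [h1, hlt]

-- characterisation of B's scan over a sorted list
theorem pvFirstGe_char (N s : Int) :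
    ∀ (xs : List Int), xs.Pairwise (· ≤ ·) → (∃ x ∈ xs, N * x ≥ s) →
    pvFirstGe N s xs ∈ xs ∧ N * pvFirstGe N s xs ≥ s ∧
      ∀ y ∈ xs, N * y ≥ s → pvFirstGe N s xs ≤ y := by
  intro xs
  induction xs with
  | nil => intro _ h; simp at h
  | cons x t ih =>
    intro hpw hex
    have hx := (List.pairwise_cons.1 hpw).1
    have ht := (List.pairwise_cons.1 hpw).2
    by_cases hq : N * x ≥ s
    · refine ⟨by simp [pvFirstGe, hq], by simp [pvFirstGe, hq], ?_⟩
      intro y hy _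
      rcases List.mem_cons.1 hy with h | h
      · simp [pvFirstGe, hq, h]
      · simp only [pvFirstGe, if_pos hq]
        exact hx y h
    · have hex' : ∃ z ∈ t, N * z ≥ s := by
        rcases hex with ⟨z, hz, hzq⟩
        rcases List.mem_cons.1 hz with h | h
        · exfalso; rw [h] at hzq; omega
        · exact ⟨z, h, hzq⟩
      obtain ⟨h1, h2, h3⟩ := ih ht hex'
      refine ⟨List.mem_cons_of_mem _ (by simpa [pvFirstGe, hq] using h1),
              by simpa [pvFirstGe, hq] using h2, ?_⟩
      intro y hy hyq
      rcases List.mem_cons.1 hy with h | h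
      · exfalso; rw [h] at hyq; omega
      · simpa [pvFirstGe, hq] using h3 y h hyq

-- ===== VERDICT (by name: the statement is the Claim_ definition above) =====
theorem minimumInteger_spec : Claim_equal_minimumInteger := by
  unfold Claim_equal_minimumInteger
  intro N A _ hpre
  unfold Spec_minimumInteger minimumInteger minimumInteger_alt
  by_cases hN : 1 < N
  · rw [if_pos hN, if_neg (by omega : ¬ N ≤ 1)]
    unfold Pre_minimumInteger at hpre
    rw [if_pos hN] at hpre
    obtain ⟨hlen, x0, hx0mem, hx0q⟩ := hpre
    have h0 : 0 < N := by omega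
    set s := A.sum with hs
    set L : List Int := (PySem.List.pyRange 0 N).map (fun i => PySem.List.pyGetD A i 0) with hLdef
    have hL : L = A.take N.toNat := pvPrefix_eq N A h0 hlen
    -- rewrite A's loop over indices as a loop over L
    have hfold :
        (PySem.List.pyRange 0 N).foldl
          (fun (d : PySem.Dict Int Int) i =>
            let temp := N * PySem.List.pyGetD A i 0
            if temp ≥ s then d.insert temp (PySem.List.pyGetD A i 0) else d)
          PySem.Dict.empty =
        L.foldl (fun d x => if N * x ≥ s then d.insert (N * x) x else d) PySem.Dict.empty := by
      rw [hLdef, List.foldl_map]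
    simp only [hfold]
    set F := L.foldl (fun d x => if N * x ≥ s then d.insert (N * x) x else d) PySem.Dict.empty with hF
    have hchar : ∀ p : Int × Int, p ∈ F.items ↔ (p.1 = N * p.2 ∧ p.2 ∈ L ∧ N * p.2 ≥ s) := by
      intro p
      rw [hF, pvDict_char N s h0 L PySem.Dict.empty (by simp [PySem.Dict.empty]) p]
      simp [PySem.Dict.empty]
    have hform : ∀ p ∈ F.items, p.1 = N * p.2 := fun p hp => ((hchar p).1 hp).1
    -- zip(keys, values) is items
    have hzip : F.keys.zip F.values = F.items := by
      simp only [PySem.Dict.keys, PySem.Dict.values]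
      exact Eq.symm (List.zip_of_prod rfl rfl)
    rw [hzip]
    -- lexicographic pair min reduces to min by second component
    have hmin2 : PySem.List.min2? F.items Prod.fst Prod.snd = PySem.List.min? F.items Prod.snd :=
      pvMin2_eq_min_snd N h0 F.items hform
    rw [hmin2]
    -- F.items is nonempty: the witness x0 contributes a pair
    have hx0L : x0 ∈ L := by rw [hL]; exact hx0mem
    have hpair : ((N * x0, x0) : Int × Int) ∈ F.items := (hchar (N * x0, x0)).2 ⟨rfl, hx0L, hx0q⟩
    obtain ⟨pm, hpm⟩ : ∃ pm, PySem.List.min? F.items Prod.snd = some pm := by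
      cases h : PySem.List.min? F.items (Prod.snd : Int × Int → Int) with
      | none =>
        exfalso
        rw [PySem.List.min?_eq_none_iff] at h
        rw [h] at hpair; exact (List.not_mem_nil hpair)
      | some pm => exact ⟨pm, rfl⟩
    rw [hpm]
    simp only [Option.getD_some]
    -- A's value: the least qualifying element of L
    have hamem : pm ∈ F.items := PySem.List.min?_mem hpm
    obtain ⟨haform, haL, haq⟩ := (hchar pm).1 hamem
    have hamin : ∀ x ∈ L, N * x ≥ s → pm.2 ≤ x := by
      intro x hx hxq
      have : ((N * x, x) : Int × Int) ∈ F.items := (hchar (N * x, x)).2 ⟨rfl, hx, hxq⟩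
      exact PySem.List.min?_isMin hpm (N * x, x) this
    -- B's value: the first qualifying element of sorted L
    have hpw : (PySem.List.sorted L (fun x => x)).Pairwise (· ≤ ·) :=
      PySem.List.sorted_pairwise L (fun x => x)
    have hexs : ∃ x ∈ PySem.List.sorted L (fun x => x), N * x ≥ s :=
      ⟨x0, (PySem.List.mem_sorted L (fun x => x) false x0).2 hx0L, hx0q⟩
    obtain ⟨hb1, hb2, hb3⟩ := pvFirstGe_char N s (PySem.List.sorted L (fun x => x)) hpw hexs
    set b := pvFirstGe N s (PySem.List.sorted L (fun x => x)) with hb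
    have hbL : b ∈ L := (PySem.List.mem_sorted L (fun x => x) false b).1 hb1
    -- they agree
    have h1 : pm.2 ≤ b := hamin b hbL hb2
    have h2 : b ≤ pm.2 := hb3 pm.2 ((PySem.List.mem_sorted L (fun x => x) false pm.2).2 haL) haq
    omega
  · rw [if_neg hN, if_pos (by omega : N ≤ 1)]
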